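-- pv_equiv track=rewrite | github.com/Brentdw05/5WWIPython | toets 3/roteer.py | roteer
-- ===== SOURCE A (Python) =====
-- def roteer(woord, n):
--     geroteerd_woord = ''
--     for letter in woord:
--         x = woord.find(letter) + n
--         if x >= len(woord)-1:
--             while x >= len(woord)-1:
--                 x -= len(woord)
--         else:
--             pass
--         geroteerd_woord += woord[x]
--     return geroteerd_woord
-- ===== SOURCE B (Python) =====
-- def roteer(woord, n):
--     L = len(woord)
--     table = {}
--     for letter in dict.fromkeys(woord):
--         x = woord.find(letter) + n
--         if x >= L - 1:
--             x = (x + 1) % L - 1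
--         table[ord(letter)] = woord[x]
--     return woord.translate(table)
-- ===== Notes on version B (the rewrite author's own statement) =====
-- stated objective: faster
-- what changed: B precomputes, once per distinct letter, the rotated character (with the wrap in closed form (x+1)%L-1 instead of A's subtraction loop) into a translation table and assembles the result with a single str.translate pass, instead of A's per-position str.find plus string concatenation.
import Mathlib
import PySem

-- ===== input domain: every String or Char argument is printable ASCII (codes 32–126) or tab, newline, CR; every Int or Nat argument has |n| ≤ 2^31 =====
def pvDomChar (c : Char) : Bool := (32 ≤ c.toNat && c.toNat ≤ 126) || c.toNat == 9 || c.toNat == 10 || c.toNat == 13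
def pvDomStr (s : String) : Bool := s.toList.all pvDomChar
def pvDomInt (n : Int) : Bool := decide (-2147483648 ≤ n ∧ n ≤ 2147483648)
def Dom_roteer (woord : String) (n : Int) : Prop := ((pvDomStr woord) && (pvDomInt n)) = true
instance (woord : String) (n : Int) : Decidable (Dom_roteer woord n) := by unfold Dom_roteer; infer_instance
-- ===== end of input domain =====

-- B replaces A's per-position find-and-append with a once-per-distinct-letter translation
-- table (wrap in closed form) assembled in a single translate pass (objective: faster).

-- ===== PORT A =====
-- 'while x >= len(woord)-1: x -= len(woord)'.  The '0 < len' conjunct is a totality guard only: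
-- whenever the Python loop runs, woord is nonempty, so it never changes behaviour.
def roteerWrapA (x : Int) (len : Int) : Int :=
  if _h : 0 < len ∧ len - 1 ≤ x then roteerWrapA (x - len) len else x
termination_by (x - len + 2).toNat
decreasing_by omega

def roteer (woord : String) (n : Int) : String :=
  -- geroteerd_woord = ''; for letter in woord: … ; geroteerd_woord += woord[x]
  String.ofList (woord.toList.foldl (fun acc letter =>
    let x := PySem.Chars.find woord.toList [letter] + n
    let x := if PySem.List.len woord.toList - 1 ≤ x then roteerWrapA x (PySem.List.len woord.toList) else x
    -- woord[x]: IndexError (pyGet? = none) is excluded by Pre_roteer; the ' ' default is unreachable there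
    acc ++ [(PySem.Chars.pyGet? woord.toList x).getD ' ']) [])

-- ===== PORT B =====
def roteer_alt (woord : String) (n : Int) : String :=
  let cs := woord.toList
  let L := PySem.List.len cs
  -- table = {}; for letter in dict.fromkeys(woord): … table[ord(letter)] = woord[x]
  let table := (PySem.List.dedup cs).foldl (fun (t : PySem.Dict Char Char) letter =>
    let x := PySem.Chars.find cs [letter] + n
    let x := if L - 1 ≤ x then PySem.Int.mod (x + 1) L - 1 else x
    -- woord[x]: IndexError excluded by Pre_roteer; the ' ' default is unreachable there
    t.insert letter ((PySem.Chars.pyGet? cs x).getD ' ')) PySem.Dict.empty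
  -- woord.translate(table): chars without an entry pass through unchanged
  String.ofList (cs.map (fun c => table.getD c c))

-- ===== PRECONDITION & SPEC =====
-- Pre_ excludes exactly the inputs where Python A raises IndexError (nonempty woord with
-- n < -len(woord): the first letter gets index 0+n below -len, skipping the wrap); B raises there too.
def Pre_roteer (woord : String) (n : Int) : Prop :=
  woord.toList = [] ∨ -(PySem.List.len woord.toList) ≤ n
instance (woord : String) (n : Int) : Decidable (Pre_roteer woord n) := by unfold Pre_roteer; infer_instance
def pvWitness_roteer : String × Int := ("banaan", -4)

def Spec_roteer (woord : String) (n : Int) (out : String) : Prop := out = roteer_alt woord n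
instance (woord : String) (n : Int) (out : String) : Decidable (Spec_roteer woord n out) := by unfold Spec_roteer; infer_instance

-- ===== CLAIM (what is proved, stated in full; the proofs are below) =====
def Claim_equal_roteer : Prop := ∀ (woord : String) (n : Int), Dom_roteer woord n → Pre_roteer woord n → Spec_roteer woord n (roteer woord n)

-- ===== LEMMAS AND PROOFS =====

-- A's while-loop wrap equals B's closed form (x+1) % L - 1 on the wrapped branch.
theorem roteerWrapA_eq_mod (L : Int) (hL : 0 < L) (x : Int) (hx : L - 1 ≤ x) :
    roteerWrapA x L = PySem.Int.mod (x + 1) L - 1 := by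
  rw [PySem.Int.mod_eq_emod_of_pos hL]
  revert hx
  induction x using roteerWrapA.induct (len := L) with
  | case1 x h ih =>
    intro _
    rw [roteerWrapA, dif_pos h]
    by_cases h2 : L - 1 ≤ x - L
    · rw [ih h2]
      have e : x - L + 1 = x + 1 - L := by ring
      rw [e, Int.sub_emod_right]
    · rw [roteerWrapA, dif_neg (by omega : ¬ (0 < L ∧ L - 1 ≤ x - L))]
      have e : (x + 1) % L = x + 1 - L :=
        (Int.sub_emod_right (x + 1) L) ▸ Int.emod_eq_of_lt (by omega) (by omega)
      omega
  | case2 x h =>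
    intro hx
    exact absurd ⟨hL, hx⟩ h

-- the per-letter output character (what both ports compute, after the wrap lemma)
def roteerChar (cs : List Char) (n : Int) (letter : Char) : Char :=
  let x := PySem.Chars.find cs [letter] + n
  let x := if PySem.List.len cs - 1 ≤ x then PySem.Int.mod (x + 1) (PySem.List.len cs) - 1 else x
  (PySem.Chars.pyGet? cs x).getD ' '

-- inserting keys other than c leaves c's entry unchanged
theorem getD_foldl_insert_of_not_mem {κ : Type} [BEq κ] [LawfulBEq κ]
    (f : κ → κ) (l : List κ) (t : PySem.Dict κ κ) (c : κ) (hc : c ∉ l) :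
    (l.foldl (fun t k => t.insert k (f k)) t).getD c c = t.getD c c := by
  induction l generalizing t with
  | nil => rfl
  | cons a l ih =>
    simp only [List.foldl_cons]
    have hne : c ≠ a := fun e => hc (by rw [e]; exact List.mem_cons_self ..)
    rw [ih _ (fun h => hc (List.mem_cons_of_mem _ h)),
        PySem.Dict.getD_insert_of_ne t (f a) c hne]

-- a dict built by inserting (k, f k) for every k of l maps each member c of l to f c
theorem getD_foldl_insert_of_mem {κ : Type} [BEq κ] [LawfulBEq κ]
    (f : κ → κ) (l : List κ) (t : PySem.Dict κ κ) (c : κ) (hc : c ∈ l) :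
    (l.foldl (fun t k => t.insert k (f k)) t).getD c c = f c := by
  induction l generalizing t with
  | nil => cases hc
  | cons a l ih =>
    simp only [List.foldl_cons]
    by_cases h : c ∈ l
    · exact ih _ h
    · have hca : c = a := by rcases List.mem_cons.mp hc with h' | h' <;> tauto
      subst hca
      rw [getD_foldl_insert_of_not_mem _ _ _ _ h, PySem.Dict.getD_insert_self]

-- ===== VERDICT (by name: the statement is the Claim_ definition above) =====
theorem roteer_spec : Claim_equal_roteer := by
  intro woord n _ _
  unfold Spec_roteer roteer roteer_alt
  rw [PySem.List.foldl_append_singleton_eq_map]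
  simp only [List.nil_append]
  congr 1
  apply List.map_congr_left
  intro c hc
  have hne : woord.toList ≠ [] := List.ne_nil_of_mem hc
  have hL : 0 < PySem.List.len woord.toList := by
    simp [PySem.List.len_eq]; exact List.length_pos_of_ne_nil hne
  have hmem : c ∈ PySem.List.dedup woord.toList := by
    rw [PySem.List.mem_dedup]; exact hc
  rw [show (fun (t : PySem.Dict Char Char) letter =>
        t.insert letter ((PySem.Chars.pyGet? woord.toList
          (if PySem.List.len woord.toList - 1 ≤ PySem.Chars.find woord.toList [letter] + n
           then PySem.Int.mod (PySem.Chars.find woord.toList [letter] + n + 1) (PySem.List.len woord.toList) - 1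
           else PySem.Chars.find woord.toList [letter] + n)).getD ' '))
      = (fun (t : PySem.Dict Char Char) k => t.insert k (roteerChar woord.toList n k)) from rfl]
  rw [getD_foldl_insert_of_mem _ _ _ _ hmem]
  unfold roteerChar
  by_cases hbr : PySem.List.len woord.toList - 1 ≤ PySem.Chars.find woord.toList [c] + n
  · simp only [hbr, if_true]
    rw [roteerWrapA_eq_mod _ hL _ hbr]
  · simp only [hbr, if_false]
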